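-- pv_equiv track=rewrite | github.com/ai-emoji/attendance_system1 | ui/dialog/absence_symbol_dialog.py | _format_symbol_text
-- ===== SOURCE A (Python) =====
-- def _format_symbol_text(text: str) -> str:
--     # Chỉ viết hoa ký tự đầu tiên (bỏ qua khoảng trắng đầu), phần sau giữ nguyên
--     out: list[str] = []
--     done = False
--     for ch in text:
--         if not done and not ch.isspace():
--             out.append(ch.upper())
--             done = True
--         else:
--             out.append(ch)
--     return "".join(out)
-- ===== SOURCE B (Python) =====
-- def _format_symbol_text(text: str) -> str:
--     # Locate the first non-whitespace character, then rebuild by slicing.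
--     for i, ch in enumerate(text):
--         if not ch.isspace():
--             return text[:i] + ch.upper() + text[i + 1:]
--     return text
-- ===== Notes on version B (the rewrite author's own statement) =====
-- stated objective: simpler
-- what changed: Replaces the char-by-char list-building loop with a done flag by locating the first non-whitespace character and returning one sliced concatenation (early return; all-whitespace input falls through unchanged).
import Mathlib
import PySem

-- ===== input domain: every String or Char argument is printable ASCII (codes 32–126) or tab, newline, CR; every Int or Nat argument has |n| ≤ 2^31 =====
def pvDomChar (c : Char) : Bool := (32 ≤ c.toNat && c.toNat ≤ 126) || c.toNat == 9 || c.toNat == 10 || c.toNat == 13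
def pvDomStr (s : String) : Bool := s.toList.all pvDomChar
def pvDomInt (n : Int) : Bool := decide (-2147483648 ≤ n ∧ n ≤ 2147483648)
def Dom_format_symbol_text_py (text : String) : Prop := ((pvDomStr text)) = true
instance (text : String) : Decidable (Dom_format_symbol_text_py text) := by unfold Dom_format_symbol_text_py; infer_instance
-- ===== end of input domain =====

-- B uppercases the first non-whitespace character by locate-then-slice instead of A's
-- char-by-char list-building loop with a done flag; objective: simpler.

-- ===== PORT A =====
-- step of A's loop over (out, done)
def fstA (st : List Char × Bool) (ch : Char) : List Char × Bool :=
  if !st.2 && !PySem.Chars.isspace ch then (st.1 ++ [PySem.Chars.upperChar ch], true)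
  else (st.1 ++ [ch], st.2)

def format_symbol_text_py (text : String) : String :=
  String.ofList (text.toList.foldl fstA ([], false)).1

-- ===== PORT B =====
-- B's enumerate loop with early return: i is the enumeration index, rest the remaining chars
def altLoop (text : String) (i : Nat) (rest : List Char) : String :=
  match rest with
  | [] => text
  | ch :: rest' =>
    if !PySem.Chars.isspace ch then
      String.ofList (text.toList.take i ++ [PySem.Chars.upperChar ch] ++ text.toList.drop (i + 1))
    else altLoop text (i + 1) rest'

def format_symbol_text_py_alt (text : String) : String := altLoop text 0 text.toList

-- ===== PRECONDITION & SPEC =====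
def Spec_format_symbol_text_py (text : String) (out : String) : Prop := out = format_symbol_text_py_alt text
instance (text : String) (out : String) : Decidable (Spec_format_symbol_text_py text out) := by unfold Spec_format_symbol_text_py; infer_instance

-- ===== CLAIM (what is proved, stated in full; the proofs are below) =====
def Claim_equal_format_symbol_text_py : Prop := ∀ (text : String), Dom_format_symbol_text_py text → Spec_format_symbol_text_py text (format_symbol_text_py text)

-- ===== LEMMAS AND PROOFS =====

-- common characterisation: uppercase the first non-space char of a char list
def capFirst (cs : List Char) : List Char :=
  match cs with
  | [] => []
  | c :: rest =>
    if PySem.Chars.isspace c then c :: capFirst rest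
    else PySem.Chars.upperChar c :: rest

theorem foldl_fstA_done (cs : List Char) (acc : List Char) :
    cs.foldl fstA (acc, true) = (acc ++ cs, true) := by
  induction cs generalizing acc with
  | nil => simp
  | cons c rest ih => simp [fstA, ih]

theorem foldl_fstA_eq (cs : List Char) (acc : List Char) :
    (cs.foldl fstA (acc, false)).1 = acc ++ capFirst cs := by
  induction cs generalizing acc with
  | nil => simp [capFirst]
  | cons c rest ih =>
    by_cases h : PySem.Chars.isspace c
    · simp [fstA, h, capFirst, ih]
    · simp [fstA, h, capFirst, foldl_fstA_done]

theorem altLoop_eq (text : String) (rest pre : List Char)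
    (h : text.toList = pre ++ rest) :
    altLoop text pre.length rest = String.ofList (pre ++ capFirst rest) := by
  induction rest generalizing pre with
  | nil =>
    simp [altLoop, capFirst, ← h]
  | cons ch rest' ih =>
    by_cases hs : PySem.Chars.isspace ch
    · have := ih (pre ++ [ch]) (by simp [h])
      simpa [altLoop, hs, capFirst] using this
    · simp only [altLoop, hs, Bool.not_false, if_pos, capFirst, h]
      have h1 : (pre ++ ch :: rest').take pre.length = pre := by
        simp
      have h2 : (pre ++ ch :: rest').drop (pre.length + 1) = rest' := by
        rw [show pre.length + 1 = (pre ++ [ch]).length by simp,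
            show pre ++ ch :: rest' = (pre ++ [ch]) ++ rest' by simp]
        simp
      rw [h1, h2]; simp

-- ===== VERDICT (by name: the statement is the Claim_ definition above) =====
theorem format_symbol_text_py_spec : Claim_equal_format_symbol_text_py := by
  intro text _
  unfold Spec_format_symbol_text_py format_symbol_text_py format_symbol_text_py_alt
  rw [foldl_fstA_eq]
  have := altLoop_eq text text.toList [] (by simp)
  simpa using this.symm
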